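-- pv_equiv track=rewrite | github.com/pioliX000/Project-Euler-in-Python | p26.py | find_repeating_part
-- ===== SOURCE A (Python) =====
-- def find_repeating_part(numerator, denominator):
-- 	k = 1
-- 	while True:
-- 		candidate = 10**k - 1
-- 		if candidate % denominator == 0:
-- 			repeating_part = (candidate // denominator) * numerator
-- 			return repeating_part
-- 		elif k > denominator:
-- 			return None  # No repeating part found, it's a terminating decimal
-- 		k += 1
-- ===== SOURCE B (Python) =====
-- def find_repeating_part(numerator, denominator):
--     # Track (10**k - 1) % denominator incrementally with small-int arithmetic;
--     # compute the one big quotient only at the end.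
--     t = 9 % denominator
--     k = 1
--     while t != 0:
--         if k > denominator:
--             return None
--         t = (t * 10 + 9) % denominator
--         k += 1
--     return ((10 ** k - 1) // denominator) * numerator
-- ===== Notes on version B (the rewrite author's own statement) =====
-- stated objective: alternative
-- what changed: B maintains the remainder (10**k - 1) % denominator incrementally instead of recomputing the k-digit bignum 10**k - 1 and dividing it at every step; the single big quotient is computed only once at the end.
import Mathlib
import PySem

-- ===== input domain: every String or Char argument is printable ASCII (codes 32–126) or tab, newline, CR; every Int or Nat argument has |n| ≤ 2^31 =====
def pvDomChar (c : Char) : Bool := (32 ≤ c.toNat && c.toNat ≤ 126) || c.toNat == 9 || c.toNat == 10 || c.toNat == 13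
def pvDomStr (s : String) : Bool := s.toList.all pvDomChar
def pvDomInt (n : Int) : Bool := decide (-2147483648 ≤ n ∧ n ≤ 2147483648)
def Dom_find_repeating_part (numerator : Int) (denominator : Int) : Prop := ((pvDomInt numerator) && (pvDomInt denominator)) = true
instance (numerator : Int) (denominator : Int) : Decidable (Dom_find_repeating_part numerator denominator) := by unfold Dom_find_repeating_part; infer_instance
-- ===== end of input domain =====

-- B replaces A's per-step k-digit bignum (10^k - 1) arithmetic by an incrementally maintained
-- remainder (10^k - 1) % denominator, computing the one big quotient only at the end.

-- ===== PORT A =====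
-- A's `while True` loop with counter k; it exits at the latest once k > denominator,
-- so the measure (denominator + 2 - k) decreases on every recursive call.
def find_repeating_part_loop (numerator denominator k : Int) : Option Int :=
  let candidate : Int := 10 ^ k.toNat - 1       -- 10**k (k ≥ 1 throughout the loop)
  if PySem.Int.mod candidate denominator = 0 then
    some (PySem.Int.floordiv candidate denominator * numerator)
  else if k > denominator then
    none
  else
    find_repeating_part_loop numerator denominator (k + 1)
termination_by (denominator + 2 - k).toNat
decreasing_by omega

def find_repeating_part (numerator : Int) (denominator : Int) : Option Int :=
  find_repeating_part_loop numerator denominator 1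

-- ===== PORT B =====
-- B's `while t != 0` loop; t is the running remainder, k the current exponent.
def find_repeating_part_alt_loop (numerator denominator k t : Int) : Option Int :=
  if t ≠ 0 then
    if k > denominator then
      none
    else
      find_repeating_part_alt_loop numerator denominator (k + 1)
        (PySem.Int.mod (t * 10 + 9) denominator)
  else
    some (PySem.Int.floordiv (10 ^ k.toNat - 1) denominator * numerator)
termination_by (denominator + 2 - k).toNat
decreasing_by omega

def find_repeating_part_alt (numerator : Int) (denominator : Int) : Option Int :=
  find_repeating_part_alt_loop numerator denominator 1 (PySem.Int.mod 9 denominator)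

-- ===== PRECONDITION & SPEC =====
-- A raises ZeroDivisionError when denominator = 0 (and so does B); excluded.
def Pre_find_repeating_part (numerator : Int) (denominator : Int) : Prop := denominator ≠ 0
instance (numerator : Int) (denominator : Int) : Decidable (Pre_find_repeating_part numerator denominator) := by unfold Pre_find_repeating_part; infer_instance
def pvWitness_find_repeating_part : Int × Int := (1, 7)
def Spec_find_repeating_part (numerator : Int) (denominator : Int) (out : Option Int) : Prop := out = find_repeating_part_alt numerator denominator
instance (numerator : Int) (denominator : Int) (out : Option Int) : Decidable (Spec_find_repeating_part numerator denominator out) := by unfold Spec_find_repeating_part; infer_instance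

-- ===== CLAIM (what is proved, stated in full; the proofs are below) =====
def Claim_equal_find_repeating_part : Prop := ∀ (numerator : Int) (denominator : Int), Dom_find_repeating_part numerator denominator → Pre_find_repeating_part numerator denominator → Spec_find_repeating_part numerator denominator (find_repeating_part numerator denominator)

-- ===== LEMMAS AND PROOFS =====

-- Advancing B's remainder from exponent k to k+1 is exact:
-- ((10^k - 1) % d) * 10 + 9 ≡ 10^(k+1) - 1 (mod d).
theorem pv_mod_step (d a : Int) :
    PySem.Int.mod (PySem.Int.mod a d * 10 + 9) d = PySem.Int.mod (a * 10 + 9) d := by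
  have h : a.fmod d * 10 + 9 = (a * 10 + 9) + d * (-(a.fdiv d * 10)) := by
    rw [Int.fmod_def]; ring
  simp only [PySem.Int.mod]
  rw [h, Int.add_mul_fmod_self_left]

theorem pv_loops_agree (numerator denominator : Int) (k : Int) (hk : 1 ≤ k) :
    find_repeating_part_loop numerator denominator k =
      find_repeating_part_alt_loop numerator denominator k
        (PySem.Int.mod (10 ^ k.toNat - 1) denominator) := by
  unfold find_repeating_part_loop find_repeating_part_alt_loop
  by_cases h0 : PySem.Int.mod (10 ^ k.toNat - 1) denominator = 0
  · simp [h0]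
  · simp only [h0, ne_eq, not_false_eq_true, if_true]
    by_cases hkd : k > denominator
    · simp [hkd]
    · simp only [hkd, if_false]
      have hrec := pv_loops_agree numerator denominator (k + 1) (by omega)
      have hpow : (k + 1).toNat = k.toNat + 1 := by omega
      have harg : PySem.Int.mod (PySem.Int.mod (10 ^ k.toNat - 1) denominator * 10 + 9)
          denominator = PySem.Int.mod (10 ^ (k + 1).toNat - 1) denominator := by
        rw [pv_mod_step]
        have : (10 ^ k.toNat - 1 : Int) * 10 + 9 = 10 ^ (k + 1).toNat - 1 := by
          rw [hpow, pow_succ]; ring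
        rw [this]
      rw [harg]
      exact hrec
termination_by (denominator + 2 - k).toNat
decreasing_by omega

-- ===== VERDICT (by name: the statement is the Claim_ definition above) =====
theorem find_repeating_part_spec : Claim_equal_find_repeating_part := by
  intro numerator denominator _ _
  unfold Spec_find_repeating_part find_repeating_part find_repeating_part_alt
  have := pv_loops_agree numerator denominator 1 (by norm_num)
  simpa using this
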